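-- pv_equiv track=rewrite | github.com/jannathshaik123/Identifying-Anchor-Residues-in-TFBS | final workflow/alignment_utils.py | generate_sorted_substrings
-- ===== SOURCE A (Python) =====
-- def generate_sorted_substrings(s):
--     substrings = [s[i:j] for i in range(len(s)) for j in range(i + 1, len(s) + 1)]
--     substrings_sorted = sorted(substrings, key=lambda x: (-len(x), x))
--     unique_substrings = []
--     for substring in substrings_sorted:
--         if substring not in unique_substrings:
--             unique_substrings.append(substring)
--     return unique_substrings
-- ===== SOURCE B (Python) =====
-- def generate_sorted_substrings(s):
--     n = len(s)
--     result = []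
--     for L in range(n, 0, -1):
--         seen = set()
--         bucket = []
--         for i in range(0, n - L + 1):
--             sub = s[i:i + L]
--             if sub not in seen:
--                 seen.add(sub)
--                 bucket.append(sub)
--         result.extend(sorted(bucket))
--     return result
-- ===== Notes on version B (the rewrite author's own statement) =====
-- stated objective: faster
-- what changed: Replaces A's single global sort of all n^2 substrings plus quadratic list-membership dedup with per-length passes: for each length L (from n down to 1) gather the substrings of that length, dedup them with a set, sort the bucket lexicographically and extend the result.
import Mathlib
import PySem

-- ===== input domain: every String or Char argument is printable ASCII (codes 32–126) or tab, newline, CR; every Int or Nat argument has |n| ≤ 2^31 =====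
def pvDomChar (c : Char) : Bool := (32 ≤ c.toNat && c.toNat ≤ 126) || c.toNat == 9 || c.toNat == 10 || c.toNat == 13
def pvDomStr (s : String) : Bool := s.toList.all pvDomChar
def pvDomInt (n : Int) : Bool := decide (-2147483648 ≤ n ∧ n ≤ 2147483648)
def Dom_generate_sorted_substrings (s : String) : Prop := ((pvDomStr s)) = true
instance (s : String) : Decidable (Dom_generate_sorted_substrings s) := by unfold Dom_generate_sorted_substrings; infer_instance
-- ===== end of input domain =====

-- B replaces A's global sort of all substrings + quadratic list-membership dedup by
-- per-length passes (gather the length-L substrings, set-dedup, sort the bucket, extend).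

-- ===== PORT A =====
def generate_sorted_substrings (s : String) : List String :=
  let substrings := (PySem.List.pyRange 0 (PySem.Str.len s) 1).flatMap (fun i =>
    (PySem.List.pyRange (i + 1) (PySem.Str.len s + 1) 1).map (fun j =>
      PySem.Str.slice s (some i) (some j)))
  let substrings_sorted := PySem.List.sorted2 substrings
    (fun x => -(PySem.Str.len x)) (fun x => x) false
  substrings_sorted.foldl
    (fun unique_substrings substring =>
      if substring ∈ unique_substrings then unique_substrings
      else unique_substrings ++ [substring]) []

-- ===== PORT B =====
def generate_sorted_substrings_alt (s : String) : List String :=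
  let n := PySem.Str.len s
  (PySem.List.pyRange n 0 (-1)).foldl (fun result L =>
    let p := (PySem.List.pyRange 0 (n - L + 1) 1).foldl
      (fun (st : PySem.Set String × List String) i =>
        let sub := PySem.Str.slice s (some i) (some (i + L))
        if PySem.Set.contains st.1 sub then st
        else (PySem.Set.add st.1 sub, st.2 ++ [sub]))
      (([] : PySem.Set String), ([] : List String))
    result ++ PySem.List.sorted p.2 (fun x => x) false) []

-- ===== PRECONDITION & SPEC =====
def Spec_generate_sorted_substrings (s : String) (out : List String) : Prop := out = generate_sorted_substrings_alt s
instance (s : String) (out : List String) : Decidable (Spec_generate_sorted_substrings s out) := by unfold Spec_generate_sorted_substrings; infer_instance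

-- ===== CLAIM (what is proved, stated in full; the proofs are below) =====
def Claim_equal_generate_sorted_substrings : Prop := ∀ (s : String), Dom_generate_sorted_substrings s → Spec_generate_sorted_substrings s (generate_sorted_substrings s)

-- ===== LEMMAS AND PROOFS =====

-- A's (injective) sort key (-len(x), x), compared lexicographically
def pvKeyL (x : String) : Lex (Int × String) := toLex (-(PySem.Str.len x), x)

-- the list of all substrings exactly as A generates it
def pvSubsA (s : String) : List String :=
  (PySem.List.pyRange 0 (PySem.Str.len s) 1).flatMap (fun i =>
    (PySem.List.pyRange (i + 1) (PySem.Str.len s + 1) 1).map (fun j =>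
      PySem.Str.slice s (some i) (some j)))

-- B's deduplicated bucket of the length-L substrings
def pvBucket (s : String) (L : Int) : List String :=
  PySem.Set.ofList ((PySem.List.pyRange 0 (PySem.Str.len s - L + 1) 1).map
    (fun i => PySem.Str.slice s (some i) (some (i + L))))

theorem pvKeyL_inj : Function.Injective pvKeyL := by
  intro a b h
  have := congrArg (fun p => (ofLex p).2) h
  simpa [pvKeyL] using this

theorem pvKeyL_lt_iff (a b : String) :
    pvKeyL a < pvKeyL b ↔ ((-(PySem.Str.len a) < -(PySem.Str.len b)) ∨
      (-(PySem.Str.len a) = -(PySem.Str.len b) ∧ a < b)) := by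
  simp [pvKeyL, Prod.Lex.lt_iff]

-- A's tuple-key sort is the sort by the single lexicographic key pvKeyL
theorem sorted2_eq_sorted_keyL (xs : List String) :
    PySem.List.sorted2 xs (fun x => -(PySem.Str.len x)) (fun x => x) false
      = PySem.List.sorted xs pvKeyL false := by
  show xs.foldl (fun acc x => PySem.List.insertBy (fun a b =>
      decide (-(PySem.Str.len a) < -(PySem.Str.len b)) ||
        (!decide (-(PySem.Str.len b) < -(PySem.Str.len a)) && decide ((a : String) < b))) x acc) []
    = xs.foldl (fun acc x => PySem.List.insertBy (fun a b => decide (pvKeyL a < pvKeyL b)) x acc) []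
  have hb : ∀ a b : String,
      (decide (-(PySem.Str.len a) < -(PySem.Str.len b)) ||
        (!decide (-(PySem.Str.len b) < -(PySem.Str.len a)) && decide ((a : String) < b)))
      = decide (pvKeyL a < pvKeyL b) := by
    intro a b
    rw [Bool.eq_iff_iff]
    simp only [Bool.or_eq_true, Bool.and_eq_true, Bool.not_eq_true', decide_eq_true_eq,
      decide_eq_false_iff_not, pvKeyL_lt_iff]
    constructor
    · rintro (h | ⟨h, hs⟩)
      · exact Or.inl h
      · by_cases h' : -(PySem.Str.len a) < -(PySem.Str.len b)
        · exact Or.inl h'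
        · exact Or.inr ⟨le_antisymm (not_lt.1 h) (not_lt.1 h'), hs⟩
    · rintro (h | ⟨h, hs⟩)
      · exact Or.inl h
      · exact Or.inr ⟨by rw [h]; exact lt_irrefl _, hs⟩
  have hB : (fun a b : String =>
      decide (-(PySem.Str.len a) < -(PySem.Str.len b)) ||
        (!decide (-(PySem.Str.len b) < -(PySem.Str.len a)) && decide ((a : String) < b)))
      = (fun a b : String => decide (pvKeyL a < pvKeyL b)) :=
    funext fun a => funext fun b => hb a b
  rw [hB]

-- A's "if substring not in unique: unique.append(substring)" loop is set(...) dedup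
theorem dedup_fold_eq_ofList (l : List String) :
    l.foldl (fun u x => if x ∈ u then u else u ++ [x]) [] = PySem.Set.ofList l := by
  rw [PySem.Set.ofList_eq_foldl]
  congr 1
  funext u x
  simp [PySem.Set.add, PySem.Set.contains]

theorem foldl_add_sublist (l : List String) : ∀ acc : List String,
    (l.foldl PySem.Set.add acc).Sublist (acc ++ l) := by
  induction l with
  | nil => intro acc; simp
  | cons x t ih =>
    intro acc
    simp only [List.foldl_cons]
    refine (ih (PySem.Set.add acc x)).trans ?_
    by_cases h : x ∈ acc
    · have ha : PySem.Set.add acc x = acc := by simp [PySem.Set.add, h]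
      rw [ha]
      exact (List.append_sublist_append_left acc).2 (List.sublist_cons_self x t)
    · have ha : PySem.Set.add acc x = acc ++ [x] := by simp [PySem.Set.add, h]
      rw [ha]
      simp [List.append_assoc]

theorem ofList_sublist (l : List String) : (PySem.Set.ofList l).Sublist l := by
  have := foldl_add_sublist l []
  rwa [PySem.Set.ofList_eq_foldl, ← List.nil_append l]

theorem A_eq (s : String) : generate_sorted_substrings s
    = PySem.Set.ofList (PySem.List.sorted (pvSubsA s) pvKeyL false) := by
  have h : generate_sorted_substrings s
      = (PySem.List.sorted2 (pvSubsA s) (fun x => -(PySem.Str.len x)) (fun x => x) false).foldl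
          (fun u x => if x ∈ u then u else u ++ [x]) [] := rfl
  rw [h, sorted2_eq_sorted_keyL, dedup_fold_eq_ofList]

theorem pairA (s : String) :
    (generate_sorted_substrings s).Pairwise (fun a b => pvKeyL a < pvKeyL b) := by
  rw [A_eq]
  have hle : (PySem.Set.ofList (PySem.List.sorted (pvSubsA s) pvKeyL false)).Pairwise
      (fun a b => pvKeyL a ≤ pvKeyL b) :=
    List.Pairwise.sublist (ofList_sublist _) (PySem.List.sorted_pairwise (pvSubsA s) pvKeyL)
  have hnd : (PySem.Set.ofList (PySem.List.sorted (pvSubsA s) pvKeyL false)).Nodup :=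
    PySem.Set.nodup_ofList _
  exact (hle.and hnd).imp (fun {a b} h =>
    lt_of_le_of_ne h.1 (fun he => h.2 (pvKeyL_inj he)))

theorem memA (s : String) (y : String) :
    y ∈ generate_sorted_substrings s ↔ y ∈ pvSubsA s := by
  rw [A_eq, PySem.Set.mem_ofList, PySem.List.mem_sorted]

-- B's inner loop keeps "seen" and "bucket" identical, so it builds set(...) in scan order
theorem pair_fold (f : Int → String) (l : List Int) : ∀ t : List String,
    l.foldl (fun (st : PySem.Set String × List String) i =>
        if PySem.Set.contains st.1 (f i) then st
        else (PySem.Set.add st.1 (f i), st.2 ++ [f i])) (t, t)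
      = (l.foldl (fun u i => PySem.Set.add u (f i)) t,
         l.foldl (fun u i => PySem.Set.add u (f i)) t) := by
  induction l with
  | nil => intro t; rfl
  | cons x r ih =>
    intro t
    simp only [List.foldl_cons]
    by_cases h : f x ∈ t
    · have hc : PySem.Set.contains t (f x) = true := by simpa [PySem.Set.contains] using h
      have ha : PySem.Set.add t (f x) = t := by simp [PySem.Set.add, h]
      rw [if_pos hc, ha]
      exact ih t
    · have hc : ¬ PySem.Set.contains t (f x) = true := by simpa [PySem.Set.contains] using h
      have ha : PySem.Set.add t (f x) = t ++ [f x] := by simp [PySem.Set.add, h]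
      rw [if_neg hc, ha]
      exact ih (t ++ [f x])

theorem bucket_eq (s : String) (L : Int) :
    ((PySem.List.pyRange 0 (PySem.Str.len s - L + 1) 1).foldl
      (fun (st : PySem.Set String × List String) i =>
        if PySem.Set.contains st.1 (PySem.Str.slice s (some i) (some (i + L))) then st
        else (PySem.Set.add st.1 (PySem.Str.slice s (some i) (some (i + L))),
              st.2 ++ [PySem.Str.slice s (some i) (some (i + L))]))
      (([] : PySem.Set String), ([] : List String))).2 = pvBucket s L := by
  have h2 : ((PySem.List.pyRange 0 (PySem.Str.len s - L + 1) 1).foldl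
      (fun (st : PySem.Set String × List String) i =>
        if PySem.Set.contains st.1 (PySem.Str.slice s (some i) (some (i + L))) then st
        else (PySem.Set.add st.1 (PySem.Str.slice s (some i) (some (i + L))),
              st.2 ++ [PySem.Str.slice s (some i) (some (i + L))]))
      (([] : PySem.Set String), ([] : List String))).2
      = (PySem.List.pyRange 0 (PySem.Str.len s - L + 1) 1).foldl
          (fun u i => PySem.Set.add u (PySem.Str.slice s (some i) (some (i + L)))) [] :=
    congrArg Prod.snd (pair_fold (fun i => PySem.Str.slice s (some i) (some (i + L)))
      (PySem.List.pyRange 0 (PySem.Str.len s - L + 1) 1) [])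
  rw [h2, ← PySem.Set.update_map_eq_foldl_add, PySem.Set.update_nil_left]
  rfl

theorem B_eq (s : String) : generate_sorted_substrings_alt s
    = (PySem.List.pyRange (PySem.Str.len s) 0 (-1)).flatMap
        (fun L => PySem.List.sorted (pvBucket s L) (fun x => x) false) := by
  have h : generate_sorted_substrings_alt s
      = (PySem.List.pyRange (PySem.Str.len s) 0 (-1)).foldl (fun result L =>
          result ++ PySem.List.sorted
            (((PySem.List.pyRange 0 (PySem.Str.len s - L + 1) 1).foldl
              (fun (st : PySem.Set String × List String) i =>
                if PySem.Set.contains st.1 (PySem.Str.slice s (some i) (some (i + L))) then st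
                else (PySem.Set.add st.1 (PySem.Str.slice s (some i) (some (i + L))),
                      st.2 ++ [PySem.Str.slice s (some i) (some (i + L))]))
              (([] : PySem.Set String), ([] : List String))).2) (fun x => x) false) [] := rfl
  rw [h]
  have hstep : (fun (result : List String) (L : Int) =>
      result ++ PySem.List.sorted
        (((PySem.List.pyRange 0 (PySem.Str.len s - L + 1) 1).foldl
          (fun (st : PySem.Set String × List String) i =>
            if PySem.Set.contains st.1 (PySem.Str.slice s (some i) (some (i + L))) then st
            else (PySem.Set.add st.1 (PySem.Str.slice s (some i) (some (i + L))),
                  st.2 ++ [PySem.Str.slice s (some i) (some (i + L))]))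
          (([] : PySem.Set String), ([] : List String))).2) (fun x => x) false)
      = (fun (result : List String) (L : Int) =>
          result ++ PySem.List.sorted (pvBucket s L) (fun x => x) false) :=
    funext fun r => funext fun L => by rw [bucket_eq]
  rw [hstep]
  simpa using PySem.List.foldl_append_eq_flatMap
    (fun L => PySem.List.sorted (pvBucket s L) (fun x => x) false)
    (PySem.List.pyRange (PySem.Str.len s) 0 (-1)) []

theorem len_mem_bucket (s : String) {L : Int} (hL : 0 < L) {y : String}
    (hy : y ∈ pvBucket s L) : PySem.Str.len y = L := by
  unfold pvBucket at hy
  rcases List.mem_map.1 ((PySem.Set.mem_ofList _ _).1 hy) with ⟨i, hi, rfl⟩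
  rcases PySem.List.mem_pyRange_one.1 hi with ⟨h0, h1⟩
  rw [PySem.Str.len_eq] at h1
  rw [PySem.Str.len_eq, PySem.Str.toList_slice]
  show ((PySem.List.slice s.toList (some i) (some (i + L))).length : Int) = L
  rw [PySem.List.slice_of_nonneg s.toList h0 (by omega) (by omega) (by omega)]
  simp only [List.length_take, List.length_drop]
  omega

theorem pairB (s : String) :
    (generate_sorted_substrings_alt s).Pairwise (fun a b => pvKeyL a < pvKeyL b) := by
  rw [B_eq, List.flatMap_def, List.pairwise_flatten]
  constructor
  · intro l hl
    rcases List.mem_map.1 hl with ⟨L, hL, rfl⟩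
    rcases PySem.List.mem_pyRange_neg_one.1 hL with ⟨h0, _⟩
    have hpl : (PySem.List.sorted (pvBucket s L) (fun x => x) false).Pairwise
        (fun a b : String => a < b) := by
      unfold pvBucket
      exact PySem.List.sorted_ofList_pairwise_lt _
    refine List.Pairwise.imp_of_mem ?_ hpl
    intro a b ha hb hab
    have e1 := len_mem_bucket s h0 ((PySem.List.mem_sorted _ _ _ _).1 ha)
    have e2 := len_mem_bucket s h0 ((PySem.List.mem_sorted _ _ _ _).1 hb)
    exact (pvKeyL_lt_iff a b).2 (Or.inr ⟨by rw [e1, e2], hab⟩)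
  · rw [List.pairwise_map]
    have hp : (PySem.List.pyRange (PySem.Str.len s) 0 (-1)).Pairwise
        (fun L1 L2 => L2 < L1) := by
      rw [PySem.List.pyRange_neg_one_eq_reverse, List.pairwise_reverse]
      exact PySem.List.pairwise_lt_pyRange_one _ _
    refine List.Pairwise.imp_of_mem ?_ hp
    intro L1 L2 hm1 hm2 hlt x hx y hy
    rcases PySem.List.mem_pyRange_neg_one.1 hm1 with ⟨h01, _⟩
    rcases PySem.List.mem_pyRange_neg_one.1 hm2 with ⟨h02, _⟩
    have e1 := len_mem_bucket s h01 ((PySem.List.mem_sorted _ _ _ _).1 hx)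
    have e2 := len_mem_bucket s h02 ((PySem.List.mem_sorted _ _ _ _).1 hy)
    exact (pvKeyL_lt_iff x y).2 (Or.inl (by rw [e1, e2]; omega))

theorem memA' (s : String) (y : String) : y ∈ pvSubsA s ↔
    ∃ i j : Int, 0 ≤ i ∧ i < PySem.Str.len s ∧ i + 1 ≤ j ∧ j < PySem.Str.len s + 1 ∧
      y = PySem.Str.slice s (some i) (some j) := by
  unfold pvSubsA
  constructor
  · intro h
    rcases List.mem_flatMap.1 h with ⟨i, hi, hy⟩
    rcases List.mem_map.1 hy with ⟨j, hj, rfl⟩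
    rcases PySem.List.mem_pyRange_one.1 hi with ⟨h1, h2⟩
    rcases PySem.List.mem_pyRange_one.1 hj with ⟨h3, h4⟩
    exact ⟨i, j, h1, h2, h3, h4, rfl⟩
  · rintro ⟨i, j, h1, h2, h3, h4, rfl⟩
    exact List.mem_flatMap.2 ⟨i, PySem.List.mem_pyRange_one.2 ⟨h1, h2⟩,
      List.mem_map.2 ⟨j, PySem.List.mem_pyRange_one.2 ⟨h3, h4⟩, rfl⟩⟩

theorem memB (s : String) (y : String) : y ∈ generate_sorted_substrings_alt s ↔
    ∃ L i : Int, 0 < L ∧ L ≤ PySem.Str.len s ∧ 0 ≤ i ∧ i < PySem.Str.len s - L + 1 ∧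
      y = PySem.Str.slice s (some i) (some (i + L)) := by
  rw [B_eq]
  constructor
  · intro h
    rcases List.mem_flatMap.1 h with ⟨L, hL, hy⟩
    rcases PySem.List.mem_pyRange_neg_one.1 hL with ⟨h1, h2⟩
    have hmem := (PySem.List.mem_sorted _ _ _ _).1 hy
    unfold pvBucket at hmem
    rcases List.mem_map.1 ((PySem.Set.mem_ofList _ _).1 hmem) with ⟨i, hi, rfl⟩
    rcases PySem.List.mem_pyRange_one.1 hi with ⟨h3, h4⟩
    exact ⟨L, i, h1, h2, h3, h4, rfl⟩
  · rintro ⟨L, i, h1, h2, h3, h4, rfl⟩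
    refine List.mem_flatMap.2 ⟨L, PySem.List.mem_pyRange_neg_one.2 ⟨h1, h2⟩, ?_⟩
    refine (PySem.List.mem_sorted _ _ _ _).2 ?_
    unfold pvBucket
    exact (PySem.Set.mem_ofList _ _).2
      (List.mem_map.2 ⟨i, PySem.List.mem_pyRange_one.2 ⟨h3, h4⟩, rfl⟩)

theorem memAB (s : String) (y : String) :
    y ∈ pvSubsA s ↔ y ∈ generate_sorted_substrings_alt s := by
  rw [memA' s y, memB s y]
  constructor
  · rintro ⟨i, j, h1, h2, h3, h4, rfl⟩
    refine ⟨j - i, i, by omega, by omega, h1, by omega, ?_⟩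
    have e : i + (j - i) = j := by omega
    rw [e]
  · rintro ⟨L, i, h1, h2, h3, h4, rfl⟩
    exact ⟨i, i + L, h3, by omega, by omega, by omega, rfl⟩

theorem eq_of_pairwise_klt {l1 l2 : List String}
    (h1 : l1.Pairwise fun a b => pvKeyL a < pvKeyL b)
    (h2 : l2.Pairwise fun a b => pvKeyL a < pvKeyL b)
    (hm : ∀ y, y ∈ l1 ↔ y ∈ l2) : l1 = l2 := by
  have n1 : l1.Nodup := h1.imp fun {a b} h => fun he => absurd (he ▸ h) (lt_irrefl _)
  have n2 : l2.Nodup := h2.imp fun {a b} h => fun he => absurd (he ▸ h) (lt_irrefl _)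
  have hp : l1.Perm l2 := (List.perm_ext_iff_of_nodup n1 n2).2 hm
  exact hp.eq_of_pairwise
    (fun a b _ _ hab hba => absurd (lt_trans hab hba) (lt_irrefl _)) h1 h2

-- ===== VERDICT (by name: the statement is the Claim_ definition above) =====
theorem generate_sorted_substrings_spec : Claim_equal_generate_sorted_substrings := by
  intro s _
  unfold Spec_generate_sorted_substrings
  exact eq_of_pairwise_klt (pairA s) (pairB s)
    (fun y => (memA s y).trans (memAB s y))
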